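-- pv_equiv track=rewrite | github.com/granlov/dmarc-watchdog | dmarc_watchdog/anomaly_explainer.py | _failure_weight
-- ===== SOURCE A (Python) =====
-- def _failure_weight(failedResults: list[str]) -> int:
--     if not failedResults:
--         return 0
--
--     severeResults = {"fail", "permerror"}
--     transientResults = {"temperror"}
--
--     if any(result in severeResults for result in failedResults):
--         return 25
--     if any(result in transientResults for result in failedResults):
--         return 15
--     return 5
-- ===== SOURCE B (Python) =====
-- def _failure_weight(failedResults: list[str]) -> int:
--     if not failedResults:
--         return 0
--     weights = {"fail": 25, "permerror": 25, "temperror": 15}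
--     return max(weights.get(r, 5) for r in failedResults)
-- ===== Notes on version B (the rewrite author's own statement) =====
-- stated objective: idiomatic
-- what changed: Replaces the two ordered any-scans over severity sets with a single pass taking the max of a per-result weight mapping (dict.get with default 5).
import Mathlib
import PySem

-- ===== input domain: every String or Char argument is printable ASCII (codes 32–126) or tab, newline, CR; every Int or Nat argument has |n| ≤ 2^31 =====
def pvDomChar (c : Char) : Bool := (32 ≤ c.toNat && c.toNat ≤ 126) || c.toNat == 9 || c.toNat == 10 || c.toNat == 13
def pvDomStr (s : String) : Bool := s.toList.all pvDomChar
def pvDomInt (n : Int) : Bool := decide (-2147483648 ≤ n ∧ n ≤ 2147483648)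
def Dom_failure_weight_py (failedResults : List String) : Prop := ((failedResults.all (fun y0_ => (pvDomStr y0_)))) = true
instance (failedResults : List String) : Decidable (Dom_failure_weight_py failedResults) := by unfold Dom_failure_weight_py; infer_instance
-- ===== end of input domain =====

-- B replaces A's two ordered any-scans with a single max over a per-result weight mapping (idiomatic; same cost).


-- ===== PORT A =====
def failure_weight_py (failedResults : List String) : Int :=
  if failedResults = [] then 0
  else
    -- severeResults = {"fail", "permerror"}; transientResults = {"temperror"} (set membership tests)
    if failedResults.any (fun result => result == "fail" || result == "permerror") then 25
    else if failedResults.any (fun result => result == "temperror") then 15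
    else 5

-- ===== PORT B =====
def pvWeights : PySem.Dict String Int :=
  PySem.Dict.ofList [("fail", 25), ("permerror", 25), ("temperror", 15)]

def failure_weight_py_alt (failedResults : List String) : Int :=
  match failedResults with
  | [] => 0
  | h :: t =>
    -- max(weights.get(r, 5) for r in failedResults) over the nonempty list
    t.foldl (fun acc r => max acc (PySem.Dict.getD pvWeights r 5)) (PySem.Dict.getD pvWeights h 5)

-- ===== PRECONDITION & SPEC =====
def Spec_failure_weight_py (failedResults : List String) (out : Int) : Prop := out = failure_weight_py_alt failedResults
instance (failedResults : List String) (out : Int) : Decidable (Spec_failure_weight_py failedResults out) := by unfold Spec_failure_weight_py; infer_instance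

-- ===== CLAIM (what is proved, stated in full; the proofs are below) =====
def Claim_equal_failure_weight_py : Prop := ∀ (failedResults : List String), Dom_failure_weight_py failedResults → Spec_failure_weight_py failedResults (failure_weight_py failedResults)

-- ===== LEMMAS AND PROOFS =====

-- the per-result weight spelled out
def pvW (r : String) : Int := if r == "fail" || r == "permerror" then 25 else if r == "temperror" then 15 else 5

theorem pvW_eq (r : String) : PySem.Dict.getD pvWeights r 5 = pvW r := by
  simp only [pvWeights, PySem.Dict.ofList, PySem.Dict.update, List.foldl_cons, List.foldl_nil,
    PySem.Dict.getD_insert, PySem.Dict.getD_empty, pvW]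
  split_ifs <;> simp_all

-- A's value on the nonempty tail, as a function
def pvF (l : List String) : Int :=
  if l.any (fun result => result == "fail" || result == "permerror") then 25
  else if l.any (fun result => result == "temperror") then 15
  else 5

theorem pvF_bounds (l : List String) : 5 ≤ pvF l ∧ pvF l ≤ 25 := by
  unfold pvF; split_ifs <;> omega

theorem pvF_cons (r : String) (t : List String) : pvF (r :: t) = max (pvW r) (pvF t) := by
  have hb := pvF_bounds t
  unfold pvF pvW
  simp only [List.any_cons]
  by_cases h1 : (r == "fail" || r == "permerror") = true <;>
    by_cases h2 : (r == "temperror") = true <;>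
      simp [h1, h2] <;> unfold pvF at hb <;> split_ifs at hb ⊢ <;> omega

theorem pvFold (l : List String) (acc : Int) (hacc : 5 ≤ acc) :
    l.foldl (fun a r => max a (PySem.Dict.getD pvWeights r 5)) acc = max acc (pvF l) := by
  induction l generalizing acc with
  | nil => unfold pvF; simp; omega
  | cons r t ih =>
    have hw : (5 : Int) ≤ pvW r := by unfold pvW; split_ifs <;> omega
    rw [List.foldl_cons, pvW_eq, ih (max acc (pvW r)) (le_max_of_le_right hw), pvF_cons]
    omega

-- ===== VERDICT (by name: the statement is the Claim_ definition above) =====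
theorem failure_weight_py_spec : Claim_equal_failure_weight_py := by
  intro l _
  unfold Spec_failure_weight_py
  cases l with
  | nil => rfl
  | cons h t =>
    have hw : (5 : Int) ≤ pvW h := by unfold pvW; split_ifs <;> omega
    simp only [failure_weight_py_alt]
    rw [pvW_eq, pvFold t (pvW h) hw]
    show pvF (h :: t) = _
    rw [pvF_cons]
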